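-- pv_equiv track=rewrite | github.com/clee421/advent-of-code | 2023/day02/run.py | calculate_game_power
-- ===== SOURCE A (Python) =====
-- from typing import Dict, List
--
-- def calculate_game_power(game: Dict["game": int, "cube_groups": List[Dict[str, int]]]) -> int:
--     max_counter = {
--         "red": 0,
--         "green": 0,
--         "blue": 0,
--     }
--     for cube_group in game["cube_groups"]:
--         for color, count in cube_group.items():
--             max_color_count = max_counter.get(color, 0)
--             max_counter[color] = max(max_color_count, count)
--
--     product = 1
--     for v in max_counter.values():
--         product *= v
--
--     return product
-- ===== SOURCE B (Python) =====
-- def calculate_game_power(game):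
--     groups = game["cube_groups"]
--     colors = ["red", "green", "blue"]
--     for g in groups:
--         for c in g:
--             if c not in colors:
--                 colors.append(c)
--     product = 1
--     for c in colors:
--         best = 0
--         for g in groups:
--             for cc, v in g.items():
--                 if cc == c and v > best:
--                     best = v
--         product *= best
--     return product
-- ===== Notes on version B (the rewrite author's own statement) =====
-- stated objective: alternative
-- what changed: Instead of threading a running max-counter dict through one forward pass and multiplying its values, B first collects the color list (defaults plus stray colors in first-occurrence order) and then, transposed, rescans all groups once per color to take that color's max, multiplying as it goes.
import Mathlib
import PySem

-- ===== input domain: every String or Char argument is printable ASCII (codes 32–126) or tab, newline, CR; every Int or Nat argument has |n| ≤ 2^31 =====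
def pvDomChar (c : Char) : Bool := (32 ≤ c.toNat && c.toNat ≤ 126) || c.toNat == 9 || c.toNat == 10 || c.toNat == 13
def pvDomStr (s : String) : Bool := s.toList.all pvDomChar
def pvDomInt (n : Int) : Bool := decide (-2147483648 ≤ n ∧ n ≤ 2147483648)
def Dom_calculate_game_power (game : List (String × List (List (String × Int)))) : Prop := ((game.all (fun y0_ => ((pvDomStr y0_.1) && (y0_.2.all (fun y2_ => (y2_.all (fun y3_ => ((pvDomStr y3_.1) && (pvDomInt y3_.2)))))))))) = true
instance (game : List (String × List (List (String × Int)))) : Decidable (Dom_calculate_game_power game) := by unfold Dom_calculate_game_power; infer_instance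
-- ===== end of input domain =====

-- B transposes the computation: instead of one forward pass maintaining a max-counter dict
-- whose values are multiplied at the end, it collects the color list first and then scans all
-- groups once per color for that color's max (alternative decomposition, no speed claim).

-- ===== PORT A =====
def calculate_game_power (game : List (String × List (List (String × Int)))) : Int :=
  match (PySem.Dict.ofList game).get? "cube_groups" with
  | none => 0  -- Python raises KeyError here; excluded by Pre_
  | some groups =>
    let mc := groups.foldl (fun mc g =>
        (PySem.Dict.ofList g).items.foldl
          (fun mc p => mc.insert p.1 (max (mc.getD p.1 0) p.2)) mc)
      (PySem.Dict.ofList [("red", (0 : Int)), ("green", 0), ("blue", 0)])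
    mc.values.foldl (fun product v => product * v) 1

-- ===== PORT B =====
def calculate_game_power_alt (game : List (String × List (List (String × Int)))) : Int :=
  match (PySem.Dict.ofList game).get? "cube_groups" with
  | none => 0  -- Python raises KeyError here; excluded by Pre_
  | some groups =>
    let colors := groups.foldl (fun ks g =>
        (PySem.Dict.ofList g).keys.foldl (fun ks c => if c ∈ ks then ks else ks ++ [c]) ks)
      ["red", "green", "blue"]
    colors.foldl (fun product c =>
      product * (groups.foldl (fun best g =>
          (PySem.Dict.ofList g).items.foldl
            (fun best p => if p.1 = c ∧ best < p.2 then p.2 else best) best) 0)) 1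

-- ===== PRECONDITION & SPEC =====
-- Pre_ excludes games without a "cube_groups" key, on which Python A raises KeyError.
def Pre_calculate_game_power (game : List (String × List (List (String × Int)))) : Prop :=
  "cube_groups" ∈ game.map (·.1)
instance (game : List (String × List (List (String × Int)))) : Decidable (Pre_calculate_game_power game) := by unfold Pre_calculate_game_power; infer_instance
def pvWitness_calculate_game_power : (List (String × List (List (String × Int)))) :=
  [("cube_groups", [[("red", 3), ("blue", 2)], [("red", 1), ("green", 4)]])]

def Spec_calculate_game_power (game : List (String × List (List (String × Int)))) (out : Int) : Prop := out = calculate_game_power_alt game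
instance (game : List (String × List (List (String × Int)))) (out : Int) : Decidable (Spec_calculate_game_power game out) := by unfold Spec_calculate_game_power; infer_instance

-- ===== CLAIM (what is proved, stated in full; the proofs are below) =====
def Claim_equal_calculate_game_power : Prop := ∀ (game : List (String × List (List (String × Int)))), Dom_calculate_game_power game → Pre_calculate_game_power game → Spec_calculate_game_power game (calculate_game_power game)

-- ===== LEMMAS AND PROOFS =====

-- foldl over a flatMap is the nested foldl
theorem pv_foldl_flatMap {α β γ : Type} (l : List α) (f : α → List β) (g : γ → β → γ) (b : γ) :
    (l.flatMap f).foldl g b = l.foldl (fun b a => (f a).foldl g b) b := by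
  induction l generalizing b with
  | nil => rfl
  | cons x xs ih => simp [List.flatMap_cons, List.foldl_append, ih]

-- the initial max-counter gives 0 on every key
theorem pv_mc0_getD (c : String) :
    (PySem.Dict.ofList [("red", (0 : Int)), ("green", 0), ("blue", 0)]).getD c 0 = 0 := by
  have h : (PySem.Dict.ofList [("red", (0 : Int)), ("green", 0), ("blue", 0)])
      = PySem.Dict.mk [("red", 0), ("green", 0), ("blue", 0)] := by decide
  rw [h, PySem.Dict.getD_eq_get?_getD]
  simp only [PySem.Dict.get?_mk_cons]
  split_ifs <;> rfl

-- A's max-counter loop, per key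
theorem pv_getD_fold (ps : List (String × Int)) (d : PySem.Dict String Int) (c : String) :
    (ps.foldl (fun mc p => mc.insert p.1 (max (mc.getD p.1 0) p.2)) d).getD c 0
      = ps.foldl (fun b p => if p.1 = c then max b p.2 else b) (d.getD c 0) := by
  induction ps generalizing d with
  | nil => rfl
  | cons p ps ih =>
    simp only [List.foldl_cons, ih, PySem.Dict.getD_insert]
    by_cases h : p.1 = c
    · subst h; simp
    · rw [if_neg (mt Eq.symm h), if_neg h]

theorem calculate_game_power_spec_aux (game : List (String × List (List (String × Int)))) :
    calculate_game_power game = calculate_game_power_alt game := by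
  unfold calculate_game_power calculate_game_power_alt
  cases hg : (PySem.Dict.ofList game).get? "cube_groups" with
  | none => rfl
  | some groups =>
    simp only
    set mc0 : PySem.Dict String Int :=
      PySem.Dict.ofList [("red", (0 : Int)), ("green", 0), ("blue", 0)] with hmc0
    set stream : List (String × Int) :=
      groups.flatMap (fun g => (PySem.Dict.ofList g).items) with hstream
    -- A's nested dict fold = one fold over the flattened pair stream
    have hA : groups.foldl (fun mc g =>
          (PySem.Dict.ofList g).items.foldl
            (fun mc p => mc.insert p.1 (max (mc.getD p.1 0) p.2)) mc) mc0
        = stream.foldl (fun mc p => mc.insert p.1 (max (mc.getD p.1 0) p.2)) mc0 := by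
      rw [hstream, pv_foldl_flatMap]
    set mc := stream.foldl (fun mc p => mc.insert p.1 (max (mc.getD p.1 0) p.2)) mc0 with hmc
    rw [hA]
    -- mc0.keys
    have hk0 : mc0.keys = ["red", "green", "blue"] := by decide
    have hk0nd : mc0.keys.Nodup := by rw [hk0]; decide
    -- mc's keys
    have hkeys : mc.keys = PySem.Set.update mc0.keys (stream.map (·.1)) := by
      rw [hmc]
      exact PySem.Dict.keys_foldl_insert_key stream (·.1) (fun d x => max (d.getD x.1 0) x.2) mc0
    have hnd : mc.keys.Nodup := by
      rw [hmc]
      exact PySem.Dict.nodup_keys_foldl_insert_key stream (·.1)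
        (fun d x => max (d.getD x.1 0) x.2) mc0 hk0nd
    -- B's color list = mc.keys
    have hcolors : groups.foldl (fun ks g =>
          (PySem.Dict.ofList g).keys.foldl (fun ks c => if c ∈ ks then ks else ks ++ [c]) ks)
          ["red", "green", "blue"]
        = mc.keys := by
      have h1 : stream.map (·.1) = groups.flatMap (fun g => (PySem.Dict.ofList g).keys) := by
        rw [hstream, List.map_flatMap]; rfl
      rw [hkeys, hk0, PySem.Set.update, h1, pv_foldl_flatMap]
      apply PySem.List.foldl_congr_mem
      intro acc x _
      apply PySem.List.foldl_congr_mem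
      intro s c _
      rw [PySem.Set.add_eq_ite]
    -- B's per-color max = mc's value at that color
    have hbest : ∀ c : String, groups.foldl (fun best g =>
          (PySem.Dict.ofList g).items.foldl
            (fun best p => if p.1 = c ∧ best < p.2 then p.2 else best) best) 0
        = mc.getD c 0 := by
      intro c
      rw [hmc, pv_getD_fold, pv_mc0_getD, ← pv_foldl_flatMap, ← hstream]
      apply PySem.List.foldl_congr_mem
      intro b p _
      by_cases h : p.1 = c
      · by_cases h' : b < p.2
        · simp [h, h', max_eq_right h'.le]
        · simp [h, h', max_eq_left (not_lt.mp h')]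
      · simp [h]
    -- the products agree
    rw [hcolors]
    have hvals : mc.values = mc.keys.map (fun k => mc.getD k 0) :=
      PySem.Dict.values_eq_map_keys mc hnd 0
    rw [hvals, List.foldl_map]
    apply PySem.List.foldl_congr_mem
    intro acc c _
    rw [hbest c]

-- ===== VERDICT (by name: the statement is the Claim_ definition above) =====
theorem calculate_game_power_spec : Claim_equal_calculate_game_power := by
  intro game _ _
  exact calculate_game_power_spec_aux game
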